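-- pv_equiv track=rewrite | github.com/isabee426/booklet_generator | arc_comprehensive_solver_v10.py | _uncrop_to_full_grid
-- ===== SOURCE A (Python) =====
-- from typing import Dict, List, Any, Optional, Tuple
--
-- def _uncrop_to_full_grid(cropped_grid: List[List[int]], full_grid: List[List[int]],
--                         bbox: List[int]) -> List[List[int]]:
--     """Uncrop transformed grid back into full grid"""
--     result = [row[:] for row in full_grid]
--     min_r, min_c, max_r, max_c = bbox
--
--     for i, row in enumerate(cropped_grid):
--         if min_r + i < len(result) and i < len(cropped_grid):
--             for j, val in enumerate(row):
--                 if min_c + j < len(result[min_r + i]) and j < len(row):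
--                     result[min_r + i][min_c + j] = val
--
--     return result
-- ===== SOURCE B (Python) =====
-- def _uncrop_to_full_grid(cropped_grid, full_grid, bbox):
--     """Rebuild the full grid in one pass: each cell takes the cropped value
--     when it lies in the overlay window, else keeps the original value."""
--     min_r, min_c, max_r, max_c = bbox
--     h = len(cropped_grid)
--     return [
--         [cropped_grid[r - min_r][c - min_c]
--          if (min_r <= r < min_r + h and 0 <= c - min_c < len(cropped_grid[r - min_r]))
--          else v
--          for c, v in enumerate(row)]
--         for r, row in enumerate(full_grid)
--     ]
-- ===== Notes on version B (the rewrite author's own statement) =====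
-- stated objective: simpler
-- what changed: B builds the result in one pure pass over every cell of full_grid with a window-membership test, instead of A's copy-then-mutate double loop over the cropped region.
-- outside the precondition, e.g. on _uncrop_to_full_grid([[9]], [[1, 2], [3, 4]], [-1, 0, 0, 0]): A returns [[1, 2], [9, 4]], B returns [[1, 2], [3, 4]]
import Mathlib
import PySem

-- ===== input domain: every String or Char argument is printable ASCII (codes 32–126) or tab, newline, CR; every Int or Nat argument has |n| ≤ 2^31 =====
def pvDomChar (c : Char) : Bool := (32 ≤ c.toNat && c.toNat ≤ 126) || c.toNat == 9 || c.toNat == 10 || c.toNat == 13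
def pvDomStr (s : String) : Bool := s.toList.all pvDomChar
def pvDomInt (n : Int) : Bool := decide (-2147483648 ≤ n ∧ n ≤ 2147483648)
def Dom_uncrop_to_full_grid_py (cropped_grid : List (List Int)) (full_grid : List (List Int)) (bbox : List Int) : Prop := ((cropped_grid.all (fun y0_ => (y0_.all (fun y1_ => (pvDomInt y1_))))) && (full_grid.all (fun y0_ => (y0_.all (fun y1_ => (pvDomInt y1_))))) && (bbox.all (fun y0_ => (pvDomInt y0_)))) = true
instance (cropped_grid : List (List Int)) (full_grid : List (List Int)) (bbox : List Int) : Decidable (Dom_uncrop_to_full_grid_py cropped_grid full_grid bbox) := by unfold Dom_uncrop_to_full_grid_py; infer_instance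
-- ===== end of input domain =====

-- B replaces A's copy-then-mutate double loop over the cropped region by one pure
-- pass over every cell of full_grid with a window-membership test (objective: simpler).

-- ===== PORT A =====
-- inner loop of A: for j, val in enumerate(row): if min_c+j < len(result[min_r+i]) and j < len(row): write
def uncropRowA (min_c : Int) (row : List Int) (rrow : List Int) : List Int :=
  (PySem.List.enumerate row 0).foldl
    (fun rr q =>
      if min_c + q.1 < (rr.length : Int) ∧ q.1 < (row.length : Int) then
        PySem.List.pySetD rr (min_c + q.1) q.2
      else rr)
    rrow

def uncrop_to_full_grid_py (cropped_grid : List (List Int)) (full_grid : List (List Int)) (bbox : List Int) : List (List Int) :=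
  match bbox with
  | [min_r, min_c, _, _] =>
    (PySem.List.enumerate cropped_grid 0).foldl
      (fun res p =>
        if min_r + p.1 < (res.length : Int) ∧ p.1 < (cropped_grid.length : Int) then
          PySem.List.pySetD res (min_r + p.1)
            (uncropRowA min_c p.2 (PySem.List.pyGetD res (min_r + p.1) []))
        else res)
      (full_grid.map (fun row => row))
  | _ => []   -- len(bbox) ≠ 4: Python raises ValueError on unpacking; excluded by Pre_

-- ===== PORT B =====
def uncrop_to_full_grid_py_alt (cropped_grid : List (List Int)) (full_grid : List (List Int)) (bbox : List Int) : List (List Int) :=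
  -- min_r, min_c, max_r, max_c = bbox: the unpack succeeds iff len(bbox) = 4
  -- (ValueError otherwise, excluded by Pre_); only min_r, min_c are used
  if bbox.length = 4 then
  let min_r := PySem.List.pyGetD bbox 0 0
  let min_c := PySem.List.pyGetD bbox 1 0
  (PySem.List.enumerate full_grid 0).map (fun p =>
    (PySem.List.enumerate p.2 0).map (fun q =>
      if min_r ≤ p.1 ∧ p.1 < min_r + (cropped_grid.length : Int) then
        let crow := PySem.List.pyGetD cropped_grid (p.1 - min_r) []
        if 0 ≤ q.1 - min_c ∧ q.1 - min_c < (crow.length : Int) then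
          PySem.List.pyGetD crow (q.1 - min_c) 0
        else q.2
      else q.2))
  else []

-- ===== PRECONDITION & SPEC =====
-- Pre_ keeps the natural domain of a crop bounding box: exactly four entries
-- (unpacking raises ValueError otherwise) and nonnegative min_r/min_c (with negative
-- ones A's in-place writes wrap to the grid's end via Python negative indexing, an
-- accident outside the function's purpose; B simply leaves those cells unchanged).
def Pre_uncrop_to_full_grid_py (cropped_grid : List (List Int)) (full_grid : List (List Int)) (bbox : List Int) : Prop :=
  bbox.length = 4 ∧ 0 ≤ bbox.getD 0 0 ∧ 0 ≤ bbox.getD 1 0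
instance (cropped_grid : List (List Int)) (full_grid : List (List Int)) (bbox : List Int) : Decidable (Pre_uncrop_to_full_grid_py cropped_grid full_grid bbox) := by unfold Pre_uncrop_to_full_grid_py; infer_instance

def pvWitness_uncrop_to_full_grid_py : List (List Int) × List (List Int) × List Int :=
  ([[5]], [[1, 2], [3, 4]], [0, 1, 0, 1])

def Spec_uncrop_to_full_grid_py (cropped_grid : List (List Int)) (full_grid : List (List Int)) (bbox : List Int) (out : List (List Int)) : Prop := out = uncrop_to_full_grid_py_alt cropped_grid full_grid bbox
instance (cropped_grid : List (List Int)) (full_grid : List (List Int)) (bbox : List Int) (out : List (List Int)) : Decidable (Spec_uncrop_to_full_grid_py cropped_grid full_grid bbox out) := by unfold Spec_uncrop_to_full_grid_py; infer_instance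

-- ===== CLAIM (what is proved, stated in full; the proofs are below) =====
def Claim_equal_uncrop_to_full_grid_py : Prop := ∀ (cropped_grid : List (List Int)) (full_grid : List (List Int)) (bbox : List Int), Dom_uncrop_to_full_grid_py cropped_grid full_grid bbox → Pre_uncrop_to_full_grid_py cropped_grid full_grid bbox → Spec_uncrop_to_full_grid_py cropped_grid full_grid bbox (uncrop_to_full_grid_py cropped_grid full_grid bbox)

-- ===== LEMMAS AND PROOFS =====

-- cell c of A's inner write loop, run over a suffix of the row starting at index s
theorem inner_fold_getElem? (min_c : Int) (hmc : 0 ≤ min_c) (rowLen : Nat)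
    (suf : List Int) (s : Nat) (hs : s + suf.length ≤ rowLen) (acc : List Int) (c : Nat) :
    ((PySem.List.enumerate suf (s : Int)).foldl
      (fun rr q =>
        if min_c + q.1 < (rr.length : Int) ∧ q.1 < (rowLen : Int) then
          PySem.List.pySetD rr (min_c + q.1) q.2
        else rr) acc)[c]? =
    if min_c + s ≤ (c : Int) ∧ (c : Int) < min_c + s + suf.length then
      acc[c]?.map (fun _ => PySem.List.pyGetD suf ((c : Int) - min_c - s) 0)
    else acc[c]? := by
  induction suf generalizing s acc with
  | nil =>
    rw [PySem.List.enumerate_nil, List.foldl_nil,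
      if_neg (by simp only [List.length_nil, Nat.cast_zero]; omega)]
  | cons x rest ih =>
    rw [PySem.List.enumerate_cons, List.foldl_cons]
    simp only [List.length_cons] at hs ⊢
    have hsr : (s : Int) < (rowLen : Int) := by exact_mod_cast by omega
    have hcast : (s : Int) + 1 = ((s + 1 : Nat) : Int) := by push_cast; ring
    by_cases hw : min_c + (s : Int) < (acc.length : Int)
    · rw [if_pos ⟨hw, hsr⟩, PySem.List.pySetD_of_nonneg acc (i := min_c + (s:Int)) x (by omega), hcast,
        ih (s + 1) (by omega)]
      by_cases h1 : (c : Int) = min_c + s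
      · rw [if_neg (by push_cast; omega), if_pos (by push_cast; omega)]
        have hcl : c < acc.length := by omega
        rw [List.getElem?_set, if_pos (by omega : (min_c + (s:Int)).toNat = c),
          if_pos (by omega : (min_c + (s:Int)).toNat < acc.length),
          List.getElem?_eq_getElem hcl]
        have h0 : (c : Int) - min_c - (s : Int) = ((0 : Nat) : Int) := by omega
        rw [h0, PySem.List.pyGetD_natCast]
        rfl
      · rw [List.getElem?_set, if_neg (by omega : ¬ (min_c + (s:Int)).toNat = c)]
        by_cases h2 : min_c + (s : Int) + 1 ≤ (c : Int) ∧ (c : Int) < min_c + (s : Int) + 1 + rest.length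
        · rw [if_pos (by push_cast; omega), if_pos (by push_cast; omega)]
          congr 1
          funext a
          have hm : (c : Int) - min_c - (s : Int) = ((c - min_c.toNat - s : Nat) : Int) := by omega
          have hm' : (c : Int) - min_c - ((s + 1 : Nat) : Int) = ((c - min_c.toNat - s - 1 : Nat) : Int) := by omega
          rw [hm, hm', PySem.List.pyGetD_natCast, PySem.List.pyGetD_natCast]
          have hst : c - min_c.toNat - s = (c - min_c.toNat - s - 1) + 1 := by omega
          rw [hst, List.getD_cons_succ]
          congr 1
        · rw [if_neg (by push_cast at h2 ⊢; omega), if_neg (by push_cast; omega)]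
    · rw [if_neg (by intro h; exact hw h.1), hcast, ih (s + 1) (by omega)]
      by_cases h2 : min_c + ((s + 1 : Nat) : Int) ≤ (c : Int) ∧ (c : Int) < min_c + ((s + 1 : Nat) : Int) + rest.length
      · rw [if_pos h2, if_pos (by push_cast at h2 ⊢; omega)]
        rw [List.getElem?_eq_none (by omega)]; rfl
      · rw [if_neg h2]
        by_cases h3 : min_c + (s : Int) ≤ (c : Int) ∧ (c : Int) < min_c + (s : Int) + (rest.length + 1)
        · rw [if_pos (by push_cast; omega)]
          rw [List.getElem?_eq_none (by omega)]; rfl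
        · rw [if_neg (by push_cast; omega)]


-- row r of A's outer loop, run over a suffix of cropped_grid starting at index s
theorem outer_fold_getElem? (min_r min_c : Int) (hmr : 0 ≤ min_r) (n : Nat)
    (suf : List (List Int)) (s : Nat) (hs : s + suf.length ≤ n)
    (res : List (List Int)) (r : Nat) :
    ((PySem.List.enumerate suf (s : Int)).foldl
      (fun res p =>
        if min_r + p.1 < (res.length : Int) ∧ p.1 < (n : Int) then
          PySem.List.pySetD res (min_r + p.1)
            (uncropRowA min_c p.2 (PySem.List.pyGetD res (min_r + p.1) []))
        else res) res)[r]? =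
    if min_r + s ≤ (r : Int) ∧ (r : Int) < min_r + s + suf.length then
      res[r]?.map (uncropRowA min_c (PySem.List.pyGetD suf ((r : Int) - min_r - s) []))
    else res[r]? := by
  induction suf generalizing s res with
  | nil =>
    rw [PySem.List.enumerate_nil, List.foldl_nil,
      if_neg (by simp only [List.length_nil, Nat.cast_zero]; omega)]
  | cons x rest ih =>
    rw [PySem.List.enumerate_cons, List.foldl_cons]
    simp only [List.length_cons] at hs ⊢
    have hsr : (s : Int) < (n : Int) := by exact_mod_cast by omega
    have hcast : (s : Int) + 1 = ((s + 1 : Nat) : Int) := by push_cast; ring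
    by_cases hw : min_r + (s : Int) < (res.length : Int)
    · rw [if_pos ⟨hw, hsr⟩,
        PySem.List.pySetD_of_nonneg res (i := min_r + (s:Int)) _ (by omega), hcast,
        ih (s + 1) (by omega)]
      by_cases h1 : (r : Int) = min_r + s
      · rw [if_neg (by push_cast; omega), if_pos (by push_cast; omega)]
        have hcl : r < res.length := by omega
        rw [List.getElem?_set, if_pos (by omega : (min_r + (s:Int)).toNat = r),
          if_pos (by omega : (min_r + (s:Int)).toNat < res.length),
          List.getElem?_eq_getElem hcl]
        have h0 : (r : Int) - min_r - (s : Int) = ((0 : Nat) : Int) := by omega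
        have hr : min_r + (s : Int) = ((r : Nat) : Int) := by omega
        rw [h0, hr, PySem.List.pyGetD_natCast, PySem.List.pyGetD_natCast]
        simp [List.getD_eq_getElem?_getD, List.getElem?_eq_getElem hcl]
      · rw [List.getElem?_set, if_neg (by omega : ¬ (min_r + (s:Int)).toNat = r)]
        by_cases h2 : min_r + (s : Int) + 1 ≤ (r : Int) ∧ (r : Int) < min_r + (s : Int) + 1 + rest.length
        · rw [if_pos (by push_cast; omega), if_pos (by push_cast; omega)]
          have hm : (r : Int) - min_r - (s : Int) = ((r - min_r.toNat - s : Nat) : Int) := by omega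
          have hm' : (r : Int) - min_r - ((s + 1 : Nat) : Int) = ((r - min_r.toNat - s - 1 : Nat) : Int) := by omega
          rw [hm, hm', PySem.List.pyGetD_natCast, PySem.List.pyGetD_natCast]
          have hst : r - min_r.toNat - s = (r - min_r.toNat - s - 1) + 1 := by omega
          rw [hst, List.getD_cons_succ]
          congr 1
        · rw [if_neg (by push_cast at h2 ⊢; omega), if_neg (by push_cast; omega)]
    · rw [if_neg (by intro h; exact hw h.1), hcast, ih (s + 1) (by omega)]
      by_cases h2 : min_r + ((s + 1 : Nat) : Int) ≤ (r : Int) ∧ (r : Int) < min_r + ((s + 1 : Nat) : Int) + rest.length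
      · rw [if_pos h2, if_pos (by push_cast at h2 ⊢; omega)]
        rw [List.getElem?_eq_none (by omega)]; rfl
      · rw [if_neg h2]
        by_cases h3 : min_r + (s : Int) ≤ (r : Int) ∧ (r : Int) < min_r + (s : Int) + (rest.length + 1)
        · rw [if_pos (by push_cast; omega)]
          rw [List.getElem?_eq_none (by omega)]; rfl
        · rw [if_neg (by push_cast; omega)]


-- A's inner loop equals B's per-row map
lemma row_eq (min_c : Int) (hmc : 0 ≤ min_c) (crow row : List Int) :
    uncropRowA min_c crow row =
    (PySem.List.enumerate row 0).map (fun q =>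
      if 0 ≤ q.1 - min_c ∧ q.1 - min_c < (crow.length : Int) then
        PySem.List.pyGetD crow (q.1 - min_c) 0
      else q.2) := by
  apply List.ext_getElem?
  intro c
  have h := inner_fold_getElem? min_c hmc crow.length crow 0 (by omega) row c
  simp only [Nat.cast_zero, add_zero, sub_zero] at h
  rw [uncropRowA, h, List.getElem?_map, PySem.List.getElem?_enumerate]
  simp only [zero_add]
  by_cases hcnd : min_c ≤ (c : Int) ∧ (c : Int) < min_c + crow.length
  · rw [if_pos hcnd]
    cases hrow : row[c]? with
    | none => rfl
    | some v =>
      simp only [Option.map_some]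
      rw [if_pos (by omega)]
  · rw [if_neg hcnd]
    cases hrow : row[c]? with
    | none => rfl
    | some v =>
      simp only [Option.map_some]
      rw [if_neg (by omega)]

-- ===== VERDICT (by name: the statement is the Claim_ definition above) =====
theorem uncrop_to_full_grid_py_spec : Claim_equal_uncrop_to_full_grid_py := by
  intro cropped_grid full_grid bbox _ hpre
  obtain ⟨hlen, h0, h1⟩ := hpre
  match bbox, hlen with
  | [b0, b1, b2, b3], _ =>
    have hb0 : (0:Int) ≤ b0 := by simpa using h0
    have hb1 : (0:Int) ≤ b1 := by simpa using h1
    simp only [Spec_uncrop_to_full_grid_py, uncrop_to_full_grid_py, uncrop_to_full_grid_py_alt]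
    rw [if_pos (show ([b0, b1, b2, b3] : List Int).length = 4 from rfl)]
    have e0 : PySem.List.pyGetD [b0, b1, b2, b3] (0:Int) 0 = b0 := rfl
    have e1 : PySem.List.pyGetD [b0, b1, b2, b3] (1:Int) 0 = b1 := rfl
    rw [e0, e1]
    apply List.ext_getElem?
    intro r
    have h := outer_fold_getElem? b0 b1 hb0 cropped_grid.length cropped_grid 0 (by omega)
      (full_grid.map (fun row => row)) r
    simp only [Nat.cast_zero, add_zero, sub_zero] at h
    rw [h]
    simp only [List.map_id']
    rw [List.getElem?_map, PySem.List.getElem?_enumerate]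
    simp only [zero_add]
    by_cases hcnd : b0 ≤ (r : Int) ∧ (r : Int) < b0 + cropped_grid.length
    · rw [if_pos hcnd]
      cases hrow : full_grid[r]? with
      | none => rfl
      | some row =>
        simp only [Option.map_some, Option.some.injEq, hcnd, and_self, if_true]
        rw [row_eq b1 hb1]
    · rw [if_neg hcnd]
      cases hrow : full_grid[r]? with
      | none => rfl
      | some row =>
        simp only [Option.map_some, Option.some.injEq, hcnd, if_false]
        exact (PySem.List.map_snd_enumerate row 0).symm
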